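-- pv_equiv track=rewrite | github.com/korean-genomics-center/Multiomics_COVID19_Severity | find_common_rna_markers_LOO.py | filter_dict_genes_loo_overlap_threshold
-- ===== SOURCE A (Python) =====
-- def filter_dict_genes_loo_overlap_threshold(dict_genes_deg_significant_of_all_loo, loo_overlap_cutoffs):
--     count_deg_gene = dict(zip(dict_genes_deg_significant_of_all_loo.keys(), list(map(lambda g : len(dict_genes_deg_significant_of_all_loo[g]), dict_genes_deg_significant_of_all_loo.keys()))))
--
--     dict_genes_over_loo_overlap_threshold = dict()
--     for overlap_cutoff in loo_overlap_cutoffs: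
--         dict_genes_over_loo_overlap_threshold[overlap_cutoff] = list(filter(lambda gene : count_deg_gene[gene] >= overlap_cutoff, count_deg_gene.keys()))
--
--     dict_genes_equal_loo_overlap_threshold = dict()
--     for overlap_cutoff in loo_overlap_cutoffs:
--         dict_genes_equal_loo_overlap_threshold[overlap_cutoff] = list(filter(lambda gene : count_deg_gene[gene] == overlap_cutoff, count_deg_gene.keys()))
--
--
--     return dict_genes_over_loo_overlap_threshold, dict_genes_equal_loo_overlap_threshold
-- ===== SOURCE B (Python) =====
-- def filter_dict_genes_loo_overlap_threshold(dict_genes_deg_significant_of_all_loo, loo_overlap_cutoffs):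
--     # One pass over the genes (cutoffs inner) instead of one full scan per cutoff.
--     dict_genes_over_loo_overlap_threshold = {cutoff: [] for cutoff in loo_overlap_cutoffs}
--     dict_genes_equal_loo_overlap_threshold = {cutoff: [] for cutoff in loo_overlap_cutoffs}
--     for gene, degs in dict_genes_deg_significant_of_all_loo.items():
--         count = len(degs)
--         if count in dict_genes_equal_loo_overlap_threshold:
--             dict_genes_equal_loo_overlap_threshold[count].append(gene)
--         for cutoff in dict_genes_over_loo_overlap_threshold:
--             if count >= cutoff:
--                 dict_genes_over_loo_overlap_threshold[cutoff].append(gene)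
--     return dict_genes_over_loo_overlap_threshold, dict_genes_equal_loo_overlap_threshold
-- ===== Notes on version B (the rewrite author's own statement) =====
-- stated objective: alternative
-- what changed: B swaps the loop nesting: instead of A's one full scan of all genes for every cutoff in each of the two output dicts, B pre-initialises one empty list per cutoff and makes a single pass over the genes, appending each gene to equal[count] and to every over[cutoff] with count >= cutoff.
import Mathlib
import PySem

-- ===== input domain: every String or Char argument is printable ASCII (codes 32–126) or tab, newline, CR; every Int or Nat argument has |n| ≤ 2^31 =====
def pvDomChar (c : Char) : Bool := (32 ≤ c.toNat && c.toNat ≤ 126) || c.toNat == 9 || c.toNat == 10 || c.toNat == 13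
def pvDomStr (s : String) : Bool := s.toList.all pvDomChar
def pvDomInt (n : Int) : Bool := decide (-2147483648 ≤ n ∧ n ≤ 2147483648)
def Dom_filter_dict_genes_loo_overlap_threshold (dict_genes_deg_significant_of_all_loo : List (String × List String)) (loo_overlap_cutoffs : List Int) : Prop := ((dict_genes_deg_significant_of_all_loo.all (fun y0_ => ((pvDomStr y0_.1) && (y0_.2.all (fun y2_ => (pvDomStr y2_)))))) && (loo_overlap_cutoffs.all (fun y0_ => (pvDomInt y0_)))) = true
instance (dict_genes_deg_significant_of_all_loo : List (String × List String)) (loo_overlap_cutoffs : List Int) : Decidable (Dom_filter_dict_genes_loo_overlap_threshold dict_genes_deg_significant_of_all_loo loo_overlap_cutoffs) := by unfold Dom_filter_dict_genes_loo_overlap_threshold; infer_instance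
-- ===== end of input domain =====

-- B makes one pass over the genes (cutoffs inner) with pre-initialised per-cutoff lists,
-- instead of A's one full scan of all genes per cutoff per output dict (objective: alternative decomposition).



-- ===== PORT A =====
def filter_dict_genes_loo_overlap_threshold (dict_genes_deg_significant_of_all_loo : List (String × List String)) (loo_overlap_cutoffs : List Int) : (List (Int × List String)) × (List (Int × List String)) :=
  let d : PySem.Dict String (List String) := PySem.Dict.mk dict_genes_deg_significant_of_all_loo
  -- count_deg_gene = dict(zip(keys, map(lambda g: len(d[g]), keys)))
  let count : PySem.Dict String Int :=
    PySem.Dict.ofList (List.zip d.keys (d.keys.map (fun g => ((d.getD g []).length : Int))))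
  -- for overlap_cutoff in loo_overlap_cutoffs: over[c] = list(filter(lambda gene: count[gene] >= c, count.keys()))
  let over_d : PySem.Dict Int (List String) :=
    loo_overlap_cutoffs.foldl
      (fun acc c => acc.insert c (count.keys.filter (fun g => decide (count.getD g 0 ≥ c)))) PySem.Dict.empty
  -- for overlap_cutoff in loo_overlap_cutoffs: equal[c] = list(filter(lambda gene: count[gene] == c, count.keys()))
  let equal_d : PySem.Dict Int (List String) :=
    loo_overlap_cutoffs.foldl
      (fun acc c => acc.insert c (count.keys.filter (fun g => count.getD g 0 == c))) PySem.Dict.empty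
  (over_d.items, equal_d.items)

-- ===== PORT B =====
def filter_dict_genes_loo_overlap_threshold_alt (dict_genes_deg_significant_of_all_loo : List (String × List String)) (loo_overlap_cutoffs : List Int) : (List (Int × List String)) × (List (Int × List String)) :=
  -- over = {c: [] for c in cutoffs}; equal = {c: [] for c in cutoffs}
  let over0 : PySem.Dict Int (List String) :=
    loo_overlap_cutoffs.foldl (fun acc c => acc.insert c []) PySem.Dict.empty
  let equal0 : PySem.Dict Int (List String) :=
    loo_overlap_cutoffs.foldl (fun acc c => acc.insert c []) PySem.Dict.empty
  let d : PySem.Dict String (List String) := PySem.Dict.mk dict_genes_deg_significant_of_all_loo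
  -- for gene, degs in d.items(): count = len(degs); if count in equal: equal[count].append(gene);
  --   for cutoff in over: if count >= cutoff: over[cutoff].append(gene)
  let res := d.items.foldl
    (fun (oe : PySem.Dict Int (List String) × PySem.Dict Int (List String)) p =>
      let cnt : Int := p.2.length
      let e := if oe.2.contains cnt then oe.2.modify cnt [] (fun l => l ++ [p.1]) else oe.2
      let o := over0.keys.foldl
        (fun o c => if cnt ≥ c then o.modify c [] (fun l => l ++ [p.1]) else o) oe.1
      (o, e)) (over0, equal0)
  (res.1.items, res.2.items)

-- ===== PRECONDITION & SPEC =====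
-- Pre_ excludes association lists with a duplicate gene key: such a list does not denote a unique
-- Python dict (duplicates collapse with last value winning), so the first-match convention is ambiguous there.
def Pre_filter_dict_genes_loo_overlap_threshold (dict_genes_deg_significant_of_all_loo : List (String × List String)) (loo_overlap_cutoffs : List Int) : Prop :=
  (dict_genes_deg_significant_of_all_loo.map Prod.fst).Nodup
instance (dict_genes_deg_significant_of_all_loo : List (String × List String)) (loo_overlap_cutoffs : List Int) : Decidable (Pre_filter_dict_genes_loo_overlap_threshold dict_genes_deg_significant_of_all_loo loo_overlap_cutoffs) := by unfold Pre_filter_dict_genes_loo_overlap_threshold; infer_instance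
def pvWitness_filter_dict_genes_loo_overlap_threshold : (List (String × List String)) × List Int :=
  ([("g1", ["a", "b"]), ("g2", ["a"])], [1, 2])
def Spec_filter_dict_genes_loo_overlap_threshold (dict_genes_deg_significant_of_all_loo : List (String × List String)) (loo_overlap_cutoffs : List Int) (out : (List (Int × List String)) × (List (Int × List String))) : Prop := out = filter_dict_genes_loo_overlap_threshold_alt dict_genes_deg_significant_of_all_loo loo_overlap_cutoffs
instance (dict_genes_deg_significant_of_all_loo : List (String × List String)) (loo_overlap_cutoffs : List Int) (out : (List (Int × List String)) × (List (Int × List String))) : Decidable (Spec_filter_dict_genes_loo_overlap_threshold dict_genes_deg_significant_of_all_loo loo_overlap_cutoffs out) := by unfold Spec_filter_dict_genes_loo_overlap_threshold; infer_instance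

-- ===== CLAIM (what is proved, stated in full; the proofs are below) =====
def Claim_equal_filter_dict_genes_loo_overlap_threshold : Prop := ∀ (dict_genes_deg_significant_of_all_loo : List (String × List String)) (loo_overlap_cutoffs : List Int), Dom_filter_dict_genes_loo_overlap_threshold dict_genes_deg_significant_of_all_loo loo_overlap_cutoffs → Pre_filter_dict_genes_loo_overlap_threshold dict_genes_deg_significant_of_all_loo loo_overlap_cutoffs → Spec_filter_dict_genes_loo_overlap_threshold dict_genes_deg_significant_of_all_loo loo_overlap_cutoffs (filter_dict_genes_loo_overlap_threshold dict_genes_deg_significant_of_all_loo loo_overlap_cutoffs)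

-- ===== LEMMAS AND PROOFS =====

-- 'keyed F U': the dict whose keys are U (in order) and whose value at k is F k.
def keyed {κ ν : Type} (F : κ → ν) (U : List κ) : PySem.Dict κ ν := PySem.Dict.mk (U.map fun k => (k, F k))

theorem keyed_congr {κ ν : Type} {F G : κ → ν} {U : List κ} (h : ∀ k ∈ U, F k = G k) :
    keyed F U = keyed G U := by
  unfold keyed
  exact congrArg PySem.Dict.mk (List.map_congr_left (fun k hk => by rw [h k hk]))

theorem keys_keyed {κ ν : Type} (F : κ → ν) (U : List κ) : (keyed F U).keys = U := by
  simp [keyed, PySem.Dict.keys, Function.comp_def]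

theorem contains_keyed {κ ν : Type} [DecidableEq κ] (F : κ → ν) (U : List κ) (k : κ) :
    (keyed F U).contains k = decide (k ∈ U) := by
  simp only [keyed, PySem.Dict.contains, List.any_map, Function.comp_def, Bool.beq_eq_decide_eq]
  rw [Bool.eq_iff_iff]
  simp only [decide_eq_true_eq, List.any_eq_true]
  exact ⟨fun ⟨x, hx, he⟩ => he ▸ hx, fun h => ⟨k, h, rfl⟩⟩

theorem getD_keyed {κ ν : Type} [DecidableEq κ] (F : κ → ν) (U : List κ) (k : κ) (dflt : ν)
    (hU : U.Nodup) (hk : k ∈ U) : (keyed F U).getD k dflt = F k := by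
  have hm : (k, F k) ∈ (keyed F U).items := List.mem_map_of_mem (f := fun k => (k, F k)) hk
  exact PySem.Dict.getD_of_mem_items _ hm (by rw [keys_keyed]; exact hU) dflt

theorem insert_keyed_mem {κ ν : Type} [DecidableEq κ] (F : κ → ν) (U : List κ) (k : κ) (v : ν)
    (hk : k ∈ U) : (keyed F U).insert k v = keyed (fun c => if c = k then v else F c) U := by
  have hc : (keyed F U).contains k = true := by rw [contains_keyed]; simpa
  unfold PySem.Dict.insert
  rw [if_pos hc]
  show PySem.Dict.mk ((keyed F U).items.map _) = _
  unfold keyed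
  rw [List.map_map]
  refine congrArg PySem.Dict.mk (List.map_congr_left (fun c _ => ?_))
  by_cases h : c = k
  · subst h; simp
  · simp [h, Function.comp_def]

theorem insert_keyed_self {κ ν : Type} [DecidableEq κ] (F : κ → ν) (U : List κ) (k : κ) :
    (keyed F U).insert k (F k) = keyed F (PySem.Set.add U k) := by
  by_cases hk : k ∈ U
  · rw [insert_keyed_mem F U k (F k) hk, PySem.Set.add_of_mem hk]
    exact keyed_congr (fun c _ => by by_cases h : c = k <;> simp [h])
  · have hc : (keyed F U).contains k = false := by rw [contains_keyed]; simpa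
    rw [PySem.Set.add_of_not_mem hk]
    simp [PySem.Dict.insert, hc, keyed]
    exact fun h => absurd h hk

theorem build_keyed {κ ν : Type} [DecidableEq κ] (F : κ → ν) (ks : List κ) :
    ∀ U : List κ, ks.foldl (fun acc c => acc.insert c (F c)) (keyed F U)
      = keyed F (PySem.Set.update U ks) := by
  induction ks with
  | nil => intro U; simp [PySem.Set.update_nil]
  | cons c t ih =>
    intro U
    rw [List.foldl_cons, insert_keyed_self, PySem.Set.update_cons]
    exact ih _

theorem build_keyed_empty {κ ν : Type} [DecidableEq κ] (F : κ → ν) (ks : List κ) :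
    ks.foldl (fun acc c => acc.insert c (F c)) PySem.Dict.empty = keyed F (PySem.Set.ofList ks) := by
  have h := build_keyed F ks []
  rwa [PySem.Set.update_nil_left] at h

theorem ofList_keyed {κ ν : Type} [DecidableEq κ] (F : κ → ν) (L : List κ) :
    PySem.Dict.ofList (L.map fun k => (k, F k)) = keyed F (PySem.Set.ofList L) := by
  unfold PySem.Dict.ofList PySem.Dict.update
  rw [List.foldl_map]
  exact build_keyed_empty F L

-- A's per-cutoff scan of the gene keys, rewritten as a filter of the pair list (needs unique keys).
theorem lookup_filter (dall : List (String × List String)) (q : List String → Bool)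
    (h : (dall.map Prod.fst).Nodup) :
    (dall.map Prod.fst).filter (fun g => q ((PySem.Dict.mk dall).getD g [])) =
      (dall.filter (fun p => q p.2)).map Prod.fst := by
  induction dall with
  | nil => simp
  | cons p t ih =>
    obtain ⟨k, v⟩ := p
    have hk : k ∉ t.map Prod.fst := (List.nodup_cons.mp h).1
    have ht : (t.map Prod.fst).Nodup := (List.nodup_cons.mp h).2
    have hhead : (PySem.Dict.mk ((k, v) :: t)).getD k [] = v := by
      simp [PySem.Dict.getD, PySem.Dict.get?_mk_cons]
    have htail : (t.map Prod.fst).filter (fun g => q ((PySem.Dict.mk ((k, v) :: t)).getD g [])) =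
        (t.filter (fun r => q r.2)).map Prod.fst := by
      rw [List.filter_congr (fun g hg => ?_), ih ht]
      have hne : (k == g) = false := by
        simp only [beq_eq_false_iff_ne, ne_eq]
        exact fun he => hk (he ▸ hg)
      simp [PySem.Dict.getD, PySem.Dict.get?_mk_cons, hne]
    by_cases hq : q v = true
    · simp only [List.map_cons, List.filter_cons, hhead, htail]
      simp [hq]
    · simp only [List.map_cons, List.filter_cons, hhead, htail]
      simp [hq]

-- B's inner cutoff loop on one gene, over an arbitrary sublist cl of the key list U.
theorem inner_over_aux (g : String) (cnt : Int) (cl : List Int) :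
    ∀ (U : List Int) (O : Int → List String), U.Nodup → cl.Nodup → (∀ c ∈ cl, c ∈ U) →
    cl.foldl (fun o c => if cnt ≥ c then PySem.Dict.modify o c [] (fun l => l ++ [g]) else o)
        (keyed O U)
      = keyed (fun c => if c ∈ cl ∧ cnt ≥ c then O c ++ [g] else O c) U := by
  induction cl with
  | nil => intro U O hU _ _; exact (keyed_congr (fun c _ => by simp)).symm
  | cons c0 t ih =>
    intro U O hU hcl hsub
    have hc0 : c0 ∈ U := hsub c0 (List.mem_cons_self ..)
    have hstep : (if cnt ≥ c0 then PySem.Dict.modify (keyed O U) c0 [] (fun l => l ++ [g])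
          else keyed O U)
        = keyed (fun c => if c = c0 ∧ cnt ≥ c0 then O c ++ [g] else O c) U := by
      by_cases hge : cnt ≥ c0
      · rw [if_pos hge]
        unfold PySem.Dict.modify
        rw [getD_keyed O U c0 [] hU hc0, insert_keyed_mem _ _ _ _ hc0]
        exact keyed_congr (fun c _ => by by_cases h : c = c0 <;> simp [h, hge])
      · rw [if_neg hge]
        exact keyed_congr (fun c _ => by
          by_cases h : c = c0 <;> simp [h, hge])
    rw [List.foldl_cons, hstep, ih U _ hU (List.nodup_cons.mp hcl).2 (fun c hc => hsub c (List.mem_cons_of_mem _ hc))]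
    refine keyed_congr (fun c _ => ?_)
    have hc0t : c0 ∉ t := (List.nodup_cons.mp hcl).1
    by_cases h : c = c0
    · subst h
      simp [hc0t]
    · by_cases hct : c ∈ t <;> simp [h, hct]

theorem inner_over (U : List Int) (hU : U.Nodup) (g : String) (cnt : Int) (O : Int → List String) :
    U.foldl (fun o c => if cnt ≥ c then PySem.Dict.modify o c [] (fun l => l ++ [g]) else o)
        (keyed O U)
      = keyed (fun c => if cnt ≥ c then O c ++ [g] else O c) U := by
  rw [inner_over_aux g cnt U U O hU hU (fun c hc => hc)]
  exact keyed_congr (fun c hc => by simp [hc])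

-- B's equal-dict update on one gene.
theorem step_equal (U : List Int) (hU : U.Nodup) (g : String) (cnt : Int) (E : Int → List String) :
    (if (keyed E U).contains cnt then (keyed E U).modify cnt [] (fun l => l ++ [g]) else keyed E U)
      = keyed (fun c => if c = cnt then E c ++ [g] else E c) U := by
  by_cases hm : cnt ∈ U
  · rw [contains_keyed, if_pos (by simpa)]
    unfold PySem.Dict.modify
    rw [getD_keyed E U cnt [] hU hm, insert_keyed_mem _ _ _ _ hm]
    exact keyed_congr (fun c _ => by by_cases h : c = cnt <;> simp [h])
  · rw [contains_keyed, if_neg (by simpa)]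
    exact keyed_congr (fun c hc => by
      have : c ≠ cnt := fun he => hm (he ▸ hc)
      simp [this])

-- B's outer gene loop.
theorem outer_fold (U : List Int) (hU : U.Nodup) (ds : List (String × List String)) :
    ∀ O E : Int → List String,
    ds.foldl
      (fun (oe : PySem.Dict Int (List String) × PySem.Dict Int (List String)) p =>
        let cnt : Int := p.2.length
        let e := if oe.2.contains cnt then oe.2.modify cnt [] (fun l => l ++ [p.1]) else oe.2
        let o := U.foldl
          (fun o c => if cnt ≥ c then o.modify c [] (fun l => l ++ [p.1]) else o) oe.1
        (o, e)) (keyed O U, keyed E U)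
      = (keyed (fun c => O c ++ (ds.filter (fun p => decide ((p.2.length : Int) ≥ c))).map Prod.fst) U,
         keyed (fun c => E c ++ (ds.filter (fun p => decide ((p.2.length : Int) = c))).map Prod.fst) U) := by
  induction ds with
  | nil =>
    intro O E
    simp only [List.foldl_nil, List.filter_nil, List.map_nil, List.append_nil]
  | cons p t ih =>
    intro O E
    rw [List.foldl_cons]
    simp only
    rw [inner_over U hU p.1 (p.2.length : Int) O, step_equal U hU p.1 (p.2.length : Int) E, ih]
    refine congrArg₂ Prod.mk (keyed_congr (fun c _ => ?_)) (keyed_congr (fun c _ => ?_))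
    · by_cases hge : (p.2.length : Int) ≥ c
      · simp [List.filter_cons, hge]
      · simp [List.filter_cons, hge]
    · by_cases heq : c = (p.2.length : Int)
      · simp [List.filter_cons, heq]
      · simp [List.filter_cons, heq, Ne.symm heq]

-- ===== VERDICT (by name: the statement is the Claim_ definition above) =====
theorem filter_dict_genes_loo_overlap_threshold_spec : Claim_equal_filter_dict_genes_loo_overlap_threshold := by
  intro dall cs _ hpre
  unfold Spec_filter_dict_genes_loo_overlap_threshold
  unfold filter_dict_genes_loo_overlap_threshold filter_dict_genes_loo_overlap_threshold_alt
  simp only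
  have hkeys : (PySem.Dict.mk dall).keys = dall.map Prod.fst := rfl
  have hpre' : ((PySem.Dict.mk dall).keys).Nodup := by rw [hkeys]; exact hpre
  -- the gene-count function
  set G : String → Int := fun g => (((PySem.Dict.mk dall).getD g []).length : Int) with hG
  have hzip : ∀ (G : String → Int), ((PySem.Dict.mk dall).keys).zip (((PySem.Dict.mk dall).keys).map G)
      = ((PySem.Dict.mk dall).keys).map (fun g => (g, G g)) := by
    intro G
    simpa using List.zip_map' (f := @id String) (g := G) (l := (PySem.Dict.mk dall).keys)
  have hcount : ∀ (G : String → Int), PySem.Dict.ofList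
        (((PySem.Dict.mk dall).keys).zip (((PySem.Dict.mk dall).keys).map G))
      = keyed G ((PySem.Dict.mk dall).keys) := by
    intro G
    rw [hzip, ofList_keyed, PySem.Set.ofList_eq_self_of_nodup _ hpre']
  rw [hcount G]
  -- the two gene-scan value functions of A, as filters of the pair list
  have hval : ∀ (q : Int → Bool),
      ((keyed G ((PySem.Dict.mk dall).keys)).keys).filter
          (fun g => q ((keyed G ((PySem.Dict.mk dall).keys)).getD g 0))
        = (dall.filter (fun p => q ((p.2.length : Int)))).map Prod.fst := by
    intro q
    rw [keys_keyed, List.filter_congr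
      (fun g hg => by rw [getD_keyed _ _ g 0 hpre' hg]), hkeys]
    simp only [hG]
    exact lookup_filter dall (fun v => q ((v.length : Int))) hpre
  -- both sides of A are builds of keyed dicts over the deduplicated cutoffs
  rw [build_keyed_empty (fun c => ((keyed G ((PySem.Dict.mk dall).keys)).keys).filter
        (fun g => decide ((keyed G ((PySem.Dict.mk dall).keys)).getD g 0 ≥ c))) cs,
      build_keyed_empty (fun c => ((keyed G ((PySem.Dict.mk dall).keys)).keys).filter
        (fun g => (keyed G ((PySem.Dict.mk dall).keys)).getD g 0 == c)) cs,
      build_keyed_empty (fun _ => ([] : List String)) cs]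
  set U := PySem.Set.ofList cs with hUdef
  have hU : U.Nodup := PySem.Set.nodup_ofList cs
  rw [keys_keyed (fun _ => ([] : List String)) U]
  rw [outer_fold U hU dall (fun _ => []) (fun _ => [])]
  refine congrArg₂ Prod.mk (congrArg PySem.Dict.items ?_) (congrArg PySem.Dict.items ?_)
  · refine keyed_congr (fun c _ => ?_)
    rw [hval (fun x => decide (x ≥ c))]
    simp
  · refine keyed_congr (fun c _ => ?_)
    rw [List.filter_congr (fun g _ => by rw [Bool.beq_eq_decide_eq]),
        hval (fun x => decide (x = c))]
    simp
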